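-- pv_equiv track=rewrite | github.com/malikinss/PyGen | PyGen for Advanced/4_nested_lists/4_6_matrices_part_3/4_6_4_get_matrix_n_X_m/4_6_4_get_matrix_n_X_m.py | get_matrix_n_X_m
-- ===== SOURCE A (Python) =====
-- from typing import List, Tuple
--
-- def get_next_row(
--     start_element: int, step: int, last_element: int
-- ) -> List[int]:
--     """
--     Generates a row of the matrix by adding elements starting from
--     start_element and increasing by step, until reaching last_element.
--
--     Args:
--         start_element (int): The first number in the row.
--         step (int): The step between consecutive numbers in the row.
--         last_element (int): The last number to be included in the row.
--
--     Returns: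
--         List[int]: A list of integers representing the row.
--     """
--     row = [element for element in range(start_element, last_element + 1, step)]
--     return row
--
-- def get_matrix_n_X_m(n: int, m: int) -> List[List[int]]:
--     """
--     Creates a matrix of size n x m, filling it with numbers from 1 to n * m
--     in a specific pattern: each row contains consecutive numbers from the
--     previous row, each starting from a new position and stepping by n.
--
--     Args:
--         n (int): The number of rows in the matrix.
--         m (int): The number of columns in the matrix.
--
--     Returns:
--         List[List[int]]: A matrix represented as a list of lists, where
--                          each inner list is a row.
--     """
--     matrix = []
--     step = n
--
--     for i in range(1, n + 1):
--         start_element = i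
--         last_element = m * n - step + i
--
--         row = get_next_row(start_element, step, last_element)
--         matrix.append(row)
--
--     return matrix
-- ===== SOURCE B (Python) =====
-- def get_matrix_n_X_m(n, m):
--     if n <= 0:
--         return []
--     nums = range(1, n * m + 1)
--     chunks = [nums[k * n:(k + 1) * n] for k in range(m)]
--     return [[chunks[c][r] for c in range(m)] for r in range(n)]
-- ===== Notes on version B (the rewrite author's own statement) =====
-- stated objective: alternative
-- what changed: B builds the flat list 1..n*m once, cuts it into m contiguous chunks of size n, and transposes by index, instead of A's per-row arithmetic stepping with range(start, last, n).
import Mathlib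
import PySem

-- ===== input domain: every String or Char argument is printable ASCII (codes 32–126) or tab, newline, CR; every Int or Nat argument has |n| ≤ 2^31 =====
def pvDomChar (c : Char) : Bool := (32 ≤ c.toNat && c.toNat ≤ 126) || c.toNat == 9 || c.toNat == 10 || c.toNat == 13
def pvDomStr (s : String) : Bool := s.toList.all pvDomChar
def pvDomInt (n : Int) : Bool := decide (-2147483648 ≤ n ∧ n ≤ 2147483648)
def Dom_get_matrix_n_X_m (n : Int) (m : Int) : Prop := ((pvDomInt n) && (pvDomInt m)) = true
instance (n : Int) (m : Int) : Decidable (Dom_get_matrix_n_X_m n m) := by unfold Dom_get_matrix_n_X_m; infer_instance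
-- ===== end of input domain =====

-- B builds the flat list 1..n*m, cuts it into m chunks of size n and transposes by index,
-- instead of A's per-row arithmetic stepping; same cost, different decomposition.


-- ===== PORT A =====
-- helper: row = [element for element in range(start_element, last_element + 1, step)]
def get_next_row (start_element : Int) (step : Int) (last_element : Int) : List Int :=
  PySem.List.pyRange start_element (last_element + 1) step

def get_matrix_n_X_m (n : Int) (m : Int) : List (List Int) :=
  (PySem.List.pyRange 1 (n + 1) 1).foldl
    (fun matrix i =>
      matrix ++ [get_next_row i n (m * n - n + i)])
    []

-- ===== PORT B =====
-- nums is a Python range object in Source B; its indexing/slicing agrees with the list pyRange.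
-- chunks[c][r] is always in range when the loops run; the .getD 0 only totalises pyGet?.
def get_matrix_n_X_m_alt (n : Int) (m : Int) : List (List Int) :=
  if n ≤ 0 then [] else
  let nums := PySem.List.pyRange 1 (n * m + 1) 1
  let chunks := (PySem.List.pyRange 0 m 1).map
    (fun k => PySem.List.slice nums (some (k * n)) (some ((k + 1) * n)))
  (PySem.List.pyRange 0 n 1).map (fun r =>
    (PySem.List.pyRange 0 m 1).map (fun c =>
      ((PySem.List.pyGet? chunks c).bind (fun ch => PySem.List.pyGet? ch r)).getD 0))

-- ===== PRECONDITION & SPEC =====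
def Spec_get_matrix_n_X_m (n : Int) (m : Int) (out : List (List Int)) : Prop := out = get_matrix_n_X_m_alt n m
instance (n : Int) (m : Int) (out : List (List Int)) : Decidable (Spec_get_matrix_n_X_m n m out) := by unfold Spec_get_matrix_n_X_m; infer_instance

-- ===== CLAIM (what is proved, stated in full; the proofs are below) =====
def Claim_equal_get_matrix_n_X_m : Prop := ∀ (n : Int) (m : Int), Dom_get_matrix_n_X_m n m → Spec_get_matrix_n_X_m n m (get_matrix_n_X_m n m)

-- ===== LEMMAS AND PROOFS =====

-- canonical form both ports are reduced to
def pvCanon (n m : Int) : List (List Int) :=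
  (List.range n.toNat).map (fun (r : Nat) =>
    (List.range m.toNat).map (fun (c : Nat) => 1 + (r : Int) + (c : Int) * n))

theorem foldl_append_singleton {α β : Type} (f : α → β) (l : List α) (init : List β) :
    l.foldl (fun acc x => acc ++ [f x]) init = init ++ l.map f := by
  induction l generalizing init with
  | nil => simp
  | cons a t ih => simp [List.foldl, ih]

theorem row_eq (n m i : Int) (hn : 0 < n) :
    PySem.List.pyRange i (m * n - n + i + 1) n
      = (List.range m.toNat).map (fun (k : Nat) => i + n * (k : Int)) := by
  rw [PySem.List.pyRange_of_pos _ _ hn]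
  have hcount : (if i < m * n - n + i + 1 then ((m * n - n + i + 1 - i + n - 1) / n).toNat else 0)
      = m.toNat := by
    split_ifs with h
    · have hm : 1 ≤ m := by nlinarith
      have he : m * n - n + i + 1 - i + n - 1 = m * n := by ring
      rw [he, Int.mul_ediv_cancel _ (ne_of_gt hn)]
    · have hm : m ≤ 0 := by nlinarith
      omega
  rw [hcount]

theorem a_eq_canon (n m : Int) : get_matrix_n_X_m n m = pvCanon n m := by
  unfold get_matrix_n_X_m pvCanon get_next_row
  rw [foldl_append_singleton]
  rcases le_or_gt n 0 with hn | hn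
  · rw [PySem.List.pyRange_one_eq_nil (by omega)]
    simp [Int.toNat_of_nonpos hn]
  · rw [PySem.List.pyRange_one 1 (n + 1)]
    have : (n + 1 - 1).toNat = n.toNat := by omega
    rw [this, List.map_map, List.nil_append]
    refine List.map_congr_left (fun r hr => ?_)
    simp only [Function.comp]
    rw [row_eq n m (1 + (r : Int)) hn]
    exact List.map_congr_left (fun c _ => by ring)

theorem b_elem (N M : Nat) (r c : Nat) (hr : r < N) (hc : c < M) :
    ((PySem.List.pyGet?
        ((List.map (fun (k : Nat) => (k : Int)) (List.range M)).map
          (fun k => PySem.List.slice (PySem.List.pyRange 1 ((N : Int) * (M : Int) + 1) 1)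
            (some (k * (N : Int))) (some ((k + 1) * (N : Int))))) (c : Int)).bind
      (fun ch => PySem.List.pyGet? ch (r : Int))).getD 0
      = 1 + (r : Int) + (c : Int) * (N : Int) := by
  rw [List.map_map, PySem.List.pyGet?_natCast]
  rw [List.getElem?_map, List.getElem?_range hc]
  simp only [Option.map_some, Option.bind_some, Function.comp]
  have h1 : ((c : Int) * (N : Int)) = ((c * N : Nat) : Int) := by push_cast; ring
  have h2 : (((c : Int) + 1) * (N : Int)) = (((c + 1) * N : Nat) : Int) := by push_cast; ring
  rw [h1, h2, PySem.List.slice_natCast, PySem.List.pyGet?_natCast]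
  rw [PySem.List.pyRange_one 1 ((N : Int) * (M : Int) + 1)]
  have h3 : ((N : Int) * (M : Int) + 1 - 1).toNat = N * M := by omega
  rw [h3]
  have hlen : (c + 1) * N - c * N = N := by rw [Nat.succ_mul]; omega
  rw [hlen]
  have hidx : c * N + r < N * M := by
    calc c * N + r < c * N + N := by omega
      _ = (c + 1) * N := by ring
      _ ≤ M * N := Nat.mul_le_mul_right N hc
      _ = N * M := Nat.mul_comm M N
  rw [List.getElem?_take_of_lt hr, List.getElem?_drop, List.getElem?_map,
    List.getElem?_range hidx]
  simp only [Option.map_some, Option.getD_some]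
  push_cast
  ring

theorem b_eq_canon (n m : Int) : get_matrix_n_X_m_alt n m = pvCanon n m := by
  unfold get_matrix_n_X_m_alt pvCanon
  rcases le_or_gt n 0 with hn | hn
  · rw [if_pos hn]
    simp [Int.toNat_of_nonpos hn]
  · rw [if_neg (by omega)]
    obtain ⟨N, rfl⟩ : ∃ N : Nat, n = (N : Int) := ⟨n.toNat, by omega⟩
    rcases le_or_gt m 0 with hm | hm
    · rw [PySem.List.pyRange_one_eq_nil (by omega : m ≤ 0)]
      have : m.toNat = 0 := by omega
      simp [this, PySem.List.pyRange_one 0 (N : Int), Function.comp_def, List.map_const']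
    · obtain ⟨M, rfl⟩ : ∃ M : Nat, m = (M : Int) := ⟨m.toNat, by omega⟩
      conv_lhs => rw [PySem.List.pyRange_one 0 (N : Int)]
      have hN' : ((N : Int) - 0).toNat = N := by omega
      rw [hN', List.map_map]
      refine List.map_congr_left (fun r hr => ?_)
      simp only [Function.comp, zero_add]
      conv_lhs => rw [PySem.List.pyRange_one 0 (M : Int)]
      have hM' : ((M : Int) - 0).toNat = M := by omega
      rw [hM', List.map_map]
      refine List.map_congr_left (fun c hc => ?_)
      simp only [Function.comp, zero_add]
      exact b_elem N M r c (List.mem_range.mp hr) (List.mem_range.mp hc)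

-- ===== VERDICT (by name: the statement is the Claim_ definition above) =====
theorem get_matrix_n_X_m_spec : Claim_equal_get_matrix_n_X_m := by
  intro n m _
  unfold Spec_get_matrix_n_X_m
  rw [a_eq_canon, b_eq_canon]
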